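-- pv_equiv track=rewrite | github.com/grantgabriel/Competitive-Programming | Competition/SCPC/Practice Contest 1/B.py | solve
-- ===== SOURCE A (Python) =====
-- def solve(N, M, A, B):
--     awal = sum((A[i] % M) * B[i] for i in range(N))
--     maxV = awal
--
--     curr = awal
--     for k in range(1, M):
--         temp = 0
--         for i in range(N):
--             nextV = (A[i] + k) % M
--             prevV = (A[i] + k - 1) % M
--             temp += (nextV - prevV) * B[i]
--         curr += temp
--         maxV = max(maxV, curr)
--
--     return maxV
-- ===== SOURCE B (Python) =====
-- def solve(N, M, A, B):
--     awal = sum((A[i] % M) * B[i] for i in range(N))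
--     if M <= 1:
--         return awal
--     # bucket the B-weights by residue of A, and total them, in one pass
--     wrap = {}
--     sumB = 0
--     for i in range(N):
--         r = A[i] % M
--         wrap[r] = wrap.get(r, 0) + B[i]
--         sumB += B[i]
--     best = awal
--     cur = awal
--     for k in range(1, M):
--         # shifting by one more wraps exactly the residue M-k back to 0
--         cur += sumB - M * wrap.get(M - k, 0)
--         if cur > best:
--             best = cur
--     return best
-- ===== Notes on version B (the rewrite author's own statement) =====
-- stated objective: faster
-- what changed: Instead of recomputing the N-term delta sum for each of the M shifts, B buckets the B-weights by residue of A[i] mod M in one pass and updates the running sum per shift in O(1) via cur += sumB - M*wrap[M-k].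
import Mathlib
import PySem

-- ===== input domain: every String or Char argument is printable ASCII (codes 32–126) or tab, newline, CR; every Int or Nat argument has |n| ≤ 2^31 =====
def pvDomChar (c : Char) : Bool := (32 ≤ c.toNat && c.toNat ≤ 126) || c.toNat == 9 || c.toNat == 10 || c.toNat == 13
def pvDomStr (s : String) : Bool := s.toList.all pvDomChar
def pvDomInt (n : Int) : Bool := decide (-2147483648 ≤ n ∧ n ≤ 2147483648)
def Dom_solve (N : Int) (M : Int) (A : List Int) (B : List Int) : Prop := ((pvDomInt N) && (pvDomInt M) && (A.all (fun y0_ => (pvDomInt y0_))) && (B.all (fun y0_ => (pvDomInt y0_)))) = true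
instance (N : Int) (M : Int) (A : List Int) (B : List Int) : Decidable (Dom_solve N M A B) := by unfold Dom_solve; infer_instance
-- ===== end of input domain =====

-- B replaces A's O(N*M) per-shift delta loop by a one-pass residue bucketing of the
-- B-weights and an O(1) update per shift (cur += sumB - M*wrap[M-k]): asymptotically faster.


-- ===== PORT A =====
def solve (N : Int) (M : Int) (A : List Int) (B : List Int) : Int :=
  let awal := ((PySem.List.pyRange 0 N 1).map (fun i =>
      PySem.Int.mod (PySem.List.pyGetD A i 0) M * PySem.List.pyGetD B i 0)).sum
  let st := (PySem.List.pyRange 1 M 1).foldl (fun (s : Int × Int) k =>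
      let temp := (PySem.List.pyRange 0 N 1).foldl (fun temp i =>
          temp + (PySem.Int.mod (PySem.List.pyGetD A i 0 + k) M
                  - PySem.Int.mod (PySem.List.pyGetD A i 0 + k - 1) M)
                 * PySem.List.pyGetD B i 0) 0
      let curr := s.2 + temp
      (max s.1 curr, curr)) (awal, awal)
  st.1

-- ===== PORT B =====
def solve_alt (N : Int) (M : Int) (A : List Int) (B : List Int) : Int :=
  let awal := ((PySem.List.pyRange 0 N 1).map (fun i =>
      PySem.Int.mod (PySem.List.pyGetD A i 0) M * PySem.List.pyGetD B i 0)).sum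
  if M ≤ 1 then awal
  else
    let ws := (PySem.List.pyRange 0 N 1).foldl (fun (s : PySem.Dict Int Int × Int) i =>
        (s.1.insert (PySem.Int.mod (PySem.List.pyGetD A i 0) M)
            (s.1.getD (PySem.Int.mod (PySem.List.pyGetD A i 0) M) 0 + PySem.List.pyGetD B i 0),
         s.2 + PySem.List.pyGetD B i 0)) (PySem.Dict.empty, 0)
    let st := (PySem.List.pyRange 1 M 1).foldl (fun (s : Int × Int) k =>
        let cur := s.2 + (ws.2 - M * ws.1.getD (M - k) 0)
        (if cur > s.1 then cur else s.1, cur)) (awal, awal)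
    st.1

-- ===== PRECONDITION & SPEC =====
-- Pre_ excludes exactly the inputs where Python A raises: ZeroDivisionError (M = 0 with a
-- nonempty index range) and IndexError (N exceeding a list length with the range nonempty).
def Pre_solve (N : Int) (M : Int) (A : List Int) (B : List Int) : Prop :=
  N ≤ 0 ∨ (M ≠ 0 ∧ N ≤ (A.length : Int) ∧ N ≤ (B.length : Int))
instance (N : Int) (M : Int) (A : List Int) (B : List Int) : Decidable (Pre_solve N M A B) := by unfold Pre_solve; infer_instance
def pvWitness_solve : Int × Int × List Int × List Int := (3, 5, [1, 2, 3], [4, 5, 6])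
def Spec_solve (N : Int) (M : Int) (A : List Int) (B : List Int) (out : Int) : Prop := out = solve_alt N M A B
instance (N : Int) (M : Int) (A : List Int) (B : List Int) (out : Int) : Decidable (Spec_solve N M A B out) := by unfold Spec_solve; infer_instance

-- ===== CLAIM (what is proved, stated in full; the proofs are below) =====
def Claim_equal_solve : Prop := ∀ (N : Int) (M : Int) (A : List Int) (B : List Int), Dom_solve N M A B → Pre_solve N M A B → Spec_solve N M A B (solve N M A B)

-- ===== LEMMAS AND PROOFS =====

-- step of one shift: the per-element delta is 1, except 1 - M at the residue that wraps
lemma pv_delta (M k x : Int) (hM : 0 < M) (hk0 : 0 < k) (hkM : k < M) :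
    PySem.Int.mod (x + k) M - PySem.Int.mod (x + k - 1) M
      = 1 - (if PySem.Int.mod x M = M - k then M else 0) := by
  have hMne : M ≠ 0 := ne_of_gt hM
  have hr0 : 0 ≤ x % M := Int.emod_nonneg x hMne
  have hr1 : x % M < M := Int.emod_lt_of_pos x hM
  have e1 : (x + k) % M = (x % M + k) % M := by
    conv_lhs => rw [Int.add_emod]
    rw [Int.emod_eq_of_lt hk0.le hkM]
  have e2 : (x + k - 1) % M = (x % M + (k - 1)) % M := by
    rw [show x + k - 1 = x + (k - 1) by ring]
    conv_lhs => rw [Int.add_emod]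
    rw [Int.emod_eq_of_lt (a := k - 1) (by omega) (by omega)]
  rw [PySem.Int.mod_eq_emod_of_pos hM, PySem.Int.mod_eq_emod_of_pos hM,
      PySem.Int.mod_eq_emod_of_pos hM, e1, e2]
  by_cases hc : x % M = M - k
  · have a1 : (x % M + k) % M = 0 := by
      rw [hc, show M - k + k = M by ring, Int.emod_self]
    have a2 : (x % M + (k - 1)) % M = M - 1 := by
      rw [hc, show M - k + (k - 1) = M - 1 by ring]
      exact Int.emod_eq_of_lt (by omega) (by omega)
    rw [if_pos hc]
    omega
  · rw [if_neg hc]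
    by_cases h2 : x % M + k < M
    · have a1 : (x % M + k) % M = x % M + k := Int.emod_eq_of_lt (by omega) h2
      have a2 : (x % M + (k - 1)) % M = x % M + (k - 1) :=
        Int.emod_eq_of_lt (by omega) (by omega)
      omega
    · have a1 : (x % M + k) % M = x % M + k - M := by
        conv_lhs => rw [show x % M + k = (x % M + k - M) + M * 1 by ring]
        rw [Int.add_mul_emod_self_left]
        exact Int.emod_eq_of_lt (by omega) (by omega)
      have a2 : (x % M + (k - 1)) % M = x % M + (k - 1) - M := by
        conv_lhs => rw [show x % M + (k - 1) = (x % M + (k - 1) - M) + M * 1 by ring]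
        rw [Int.add_mul_emod_self_left]
        exact Int.emod_eq_of_lt (by omega) (by omega)
      omega

lemma pv_sum_sub (f g : Int → Int) (l : List Int) :
    (l.map (fun i => f i - g i)).sum = (l.map f).sum - (l.map g).sum := by
  induction l with
  | nil => simp
  | cons h t ih => simp [ih]; ring

lemma pv_sum_ite_mul (p : Int → Bool) (v : Int → Int) (M : Int) (l : List Int) :
    (l.map (fun i => if p i then M * v i else 0)).sum = M * ((l.filter p).map v).sum := by
  induction l with
  | nil => simp
  | cons h t ih =>
    by_cases hp : p h
    · simp [hp, ih]; ring
    · simp [hp, ih]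

-- the bucket dictionary holds, at each residue r, the sum of the B-weights whose key is r
lemma pv_dict_sum (key v : Int → Int) (l : List Int) (d : PySem.Dict Int Int) (r : Int) :
    ((l.foldl (fun d i => d.insert (key i) (d.getD (key i) 0 + v i)) d).getD r 0)
      = d.getD r 0 + ((l.filter (fun i => key i == r)).map v).sum := by
  induction l generalizing d with
  | nil => simp
  | cons h t ih =>
    simp only [List.foldl_cons, ih, List.filter_cons]
    by_cases hr : key h = r
    · simp [hr]; ring
    · simp [hr, PySem.Dict.getD_insert, Ne.symm hr]

-- A's inner loop over i, for one shift k, equals sumB - M * (B-sum over the wrapping residue)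
lemma pv_temp (N M k : Int) (A B : List Int) (hM : 0 < M) (hk0 : 0 < k) (hkM : k < M) :
    (PySem.List.pyRange 0 N 1).foldl (fun temp i =>
        temp + (PySem.Int.mod (PySem.List.pyGetD A i 0 + k) M
                - PySem.Int.mod (PySem.List.pyGetD A i 0 + k - 1) M)
               * PySem.List.pyGetD B i 0) 0
    = ((PySem.List.pyRange 0 N 1).map (fun i => PySem.List.pyGetD B i 0)).sum
      - M * (((PySem.List.pyRange 0 N 1).filter
              (fun i => PySem.Int.mod (PySem.List.pyGetD A i 0) M == M - k)).map
              (fun i => PySem.List.pyGetD B i 0)).sum := by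
  rw [PySem.List.foldl_add]
  have h1 : ∀ i : Int,
      (PySem.Int.mod (PySem.List.pyGetD A i 0 + k) M
        - PySem.Int.mod (PySem.List.pyGetD A i 0 + k - 1) M) * PySem.List.pyGetD B i 0
      = PySem.List.pyGetD B i 0
        - (if (PySem.Int.mod (PySem.List.pyGetD A i 0) M == M - k)
           then M * PySem.List.pyGetD B i 0 else 0) := by
    intro i
    rw [pv_delta M k _ hM hk0 hkM]
    by_cases h : PySem.Int.mod (PySem.List.pyGetD A i 0) M = M - k
    · simp [h]; ring
    · simp [h]
  rw [List.map_congr_left (fun i _ => h1 i), pv_sum_sub,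
      pv_sum_ite_mul (fun i => PySem.Int.mod (PySem.List.pyGetD A i 0) M == M - k)]
  omega

-- ===== VERDICT (by name: the statement is the Claim_ definition above) =====
theorem solve_spec : Claim_equal_solve := by
  intro N M A B _hDom _hPre
  simp only [Spec_solve, solve, solve_alt]
  by_cases hM1 : M ≤ 1
  · rw [PySem.List.pyRange_one_eq_nil hM1, if_pos hM1]
    simp
  · rw [if_neg hM1]
    have hM : (0 : Int) < M := by omega
    rw [PySem.List.foldl_prod_mk
        (f := fun (d : PySem.Dict Int Int) i =>
            d.insert (PySem.Int.mod (PySem.List.pyGetD A i 0) M)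
              (d.getD (PySem.Int.mod (PySem.List.pyGetD A i 0) M) 0 + PySem.List.pyGetD B i 0))
        (g := fun (c : Int) i => c + PySem.List.pyGetD B i 0)]
    refine congrArg Prod.fst (PySem.List.foldl_congr_mem _ _ _ _ ?_)
    intro s k hk
    rw [PySem.List.mem_pyRange_one] at hk
    have hTc := pv_temp N M k A B hM (by omega) hk.2
    rw [hTc, pv_dict_sum, PySem.List.foldl_add]
    simp only [PySem.Dict.getD_empty, zero_add]
    have hmax : ∀ a b : Int, max a b = if b > a then b else a := by
      intro a b; rcases le_total b a with h | h <;> simp [max_def] <;> omega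
    rw [hmax]
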